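-- pv_equiv track=rewrite | github.com/onehowon/ESTSoftAssignment | 애니팡.py | peung_chain
-- ===== SOURCE A (Python) =====
-- def peung_chain(board):
--   peung_list = []
--
--   flag = 0
--   for i in range(5):
--     for j in range(5):
--       if board[i][j] != 0:
--         if j<3 and (board[i][j] == board[i][j+1] == board[i][j+2]):
--           flag = 1
--           k = j
--           while (k<5 and (board[i][j] == board[i][k])):
--             peung_list.append((i,k))
--             k+=1
--         if i<3 and (board[i][j] == board[i+1][j] == board[i+2][j]):
--           flag = 1
--           k = i
--           while (k<5 and (board[i][j] == board[k][j])):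
--             peung_list.append((k,j))
--             k+=1
--
--   for item in peung_list:
--     board[item[0]][item[1]] =0
--
--   if flag == 1:
--     return True
--   else:
--     return False
-- ===== SOURCE B (Python) =====
-- # B: scan each row/column once for maximal runs (length>=3, nonzero), collect a clear-set,
-- # zero those cells afterwards and return whether anything was cleared (same in-place mutation as A).
-- def peung_chain(board):
--     def run_cells(line):
--         out = []
--         start = 0
--         for pos in range(1, len(line) + 1):
--             if pos == len(line) or line[pos] != line[start]:
--                 if line[start] != 0 and pos - start >= 3:
--                     out.extend(range(start, pos))
--                 start = pos
--         return out
--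
--     clear = set()
--     for i in range(5):
--         for c in run_cells(board[i][:5]):
--             clear.add((i, c))
--     for j in range(5):
--         col = [board[r][j] for r in range(5)]
--         for r in run_cells(col):
--             clear.add((r, j))
--     for (r, c) in clear:
--         board[r][c] = 0
--     return bool(clear)
-- ===== Notes on version B (the rewrite author's own statement) =====
-- stated objective: alternative
-- what changed: Replaces A's per-cell triple test with nested while-loop re-appends by a single maximal-run scan of each row and column that collects a clear-set, zeroes it after the full scan, and returns whether it is nonempty.
import Mathlib
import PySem

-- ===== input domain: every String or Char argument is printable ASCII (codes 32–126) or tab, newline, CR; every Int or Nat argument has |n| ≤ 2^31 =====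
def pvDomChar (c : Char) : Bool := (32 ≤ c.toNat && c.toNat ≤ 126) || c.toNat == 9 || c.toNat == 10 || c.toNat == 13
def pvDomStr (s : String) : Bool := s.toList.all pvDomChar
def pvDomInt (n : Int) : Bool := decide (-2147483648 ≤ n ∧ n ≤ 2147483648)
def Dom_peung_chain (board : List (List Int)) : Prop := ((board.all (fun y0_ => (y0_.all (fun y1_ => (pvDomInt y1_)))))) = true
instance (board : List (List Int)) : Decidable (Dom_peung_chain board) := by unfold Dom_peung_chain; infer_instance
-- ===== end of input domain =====

-- B scans each row/column once for maximal runs (length >= 3, nonzero) instead of A's per-cell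
-- triple test with inner while loops; equivalence is about the RETURN value only (the Python
-- versions also perform the same in-place zeroing, which the Lean ports do not model).

-- ===== PORT A =====
-- board[i][j]; total with defaults, exact under Pre_ (all accessed indices are in range there)
def aGet (board : List (List Int)) (i j : Int) : Int :=
  PySem.List.pyGetD (PySem.List.pyGetD board i []) j 0

-- the 'while (k<5 and board[i][j]==board[i][k]): peung_list.append((i,k)); k+=1' loop;
-- fuel = (5 - k).toNat encodes the 'k < 5' bound
def aRowRun (board : List (List Int)) (i j : Int) : Nat → Int → List (Int × Int) → List (Int × Int)
  | 0, _, acc => acc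
  | Nat.succ f, k, acc =>
      if aGet board i j = aGet board i k then
        aRowRun board i j f (k + 1) (acc ++ [(i, k)])
      else acc

-- the vertical while loop, same shape
def aColRun (board : List (List Int)) (i j : Int) : Nat → Int → List (Int × Int) → List (Int × Int)
  | 0, _, acc => acc
  | Nat.succ f, k, acc =>
      if aGet board i j = aGet board k j then
        aColRun board i j f (k + 1) (acc ++ [(k, j)])
      else acc

def peung_chain (board : List (List Int)) : Bool :=
  let st :=
    (PySem.List.pyRange 0 5 1).foldl (fun st i =>
      (PySem.List.pyRange 0 5 1).foldl (fun st j =>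
        if aGet board i j ≠ 0 then
          let st :=
            if j < 3 ∧ aGet board i j = aGet board i (j + 1) ∧ aGet board i (j + 1) = aGet board i (j + 2) then
              (1, aRowRun board i j (5 - j).toNat j st.2)
            else st
          if i < 3 ∧ aGet board i j = aGet board (i + 1) j ∧ aGet board (i + 1) j = aGet board (i + 2) j then
            (1, aColRun board i j (5 - i).toNat i st.2)
          else st
        else st) st) ((0 : Int), ([] : List (Int × Int)))
  -- the final zeroing loop mutates the caller's board and does not affect the return value
  if st.1 = 1 then true else false

-- ===== PORT B =====
def bGet (line : List Int) (i : Int) : Int := PySem.List.pyGetD line i 0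

-- indices belonging to maximal runs of equal nonzero values of length >= 3, one pass
def runCells (line : List Int) : List Int :=
  let n : Int := line.length
  (((PySem.List.pyRange 1 (n + 1) 1).foldl (fun (st : Int × List Int) pos =>
      if pos = n ∨ bGet line pos ≠ bGet line st.1 then
        (pos,
          if bGet line st.1 ≠ 0 ∧ pos - st.1 ≥ 3 then st.2 ++ PySem.List.pyRange st.1 pos 1
          else st.2)
      else st) ((0 : Int), ([] : List Int)))).2

def peung_chain_alt (board : List (List Int)) : Bool :=
  let clear : PySem.Set (Int × Int) :=
    (PySem.List.pyRange 0 5 1).foldl (fun s i =>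
      (runCells (PySem.List.slice (PySem.List.pyGetD board i []) none (some 5))).foldl
        (fun s c => PySem.Set.add s (i, c)) s) PySem.Set.empty
  let clear :=
    (PySem.List.pyRange 0 5 1).foldl (fun s j =>
      (runCells ((PySem.List.pyRange 0 5 1).map (fun r => bGet (PySem.List.pyGetD board r []) j))).foldl
        (fun s r => PySem.Set.add s (r, j)) s) clear
  !clear.isEmpty

-- ===== PRECONDITION & SPEC =====
-- Pre_: the inputs on which Python A returns (it indexes board[i][j] for all 0 <= i,j < 5,
-- raising IndexError on fewer than 5 rows or a short row among the first 5)
def Pre_peung_chain (board : List (List Int)) : Prop :=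
  5 ≤ board.length ∧ ∀ row ∈ board.take 5, 5 ≤ row.length
instance (board : List (List Int)) : Decidable (Pre_peung_chain board) := by
  unfold Pre_peung_chain; infer_instance

def pvWitness_peung_chain : List (List Int) :=
  [[1, 2, 3, 4, 5], [2, 3, 4, 5, 6], [3, 4, 5, 6, 7], [4, 5, 6, 7, 8], [5, 6, 7, 8, 9]]

def Spec_peung_chain (board : List (List Int)) (out : Bool) : Prop := out = peung_chain_alt board
instance (board : List (List Int)) (out : Bool) : Decidable (Spec_peung_chain board out) := by unfold Spec_peung_chain; infer_instance

-- ===== CLAIM (what is proved, stated in full; the proofs are below) =====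
def Claim_equal_peung_chain : Prop := ∀ (board : List (List Int)), Dom_peung_chain board → Pre_peung_chain board → Spec_peung_chain board (peung_chain board)


-- ===== LEMMAS AND PROOFS =====

-- A's per-cell trigger: cell (i,j) is nonzero and starts a horizontal or vertical triple
def Cij (board : List (List Int)) (i j : Int) : Prop :=
  aGet board i j ≠ 0 ∧
    ((j < 3 ∧ aGet board i j = aGet board i (j + 1) ∧ aGet board i (j + 1) = aGet board i (j + 2)) ∨
     (i < 3 ∧ aGet board i j = aGet board (i + 1) j ∧ aGet board (i + 1) j = aGet board (i + 2) j))

-- a fold whose first (flag) component becomes 1 exactly when some element fires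
lemma foldl_flag_iff {X S : Type} (f : (Int × S) → X → (Int × S)) (D : X → Prop)
    (h : ∀ st x, ((f st x).1 = 1 ↔ D x ∨ st.1 = 1)) (L : List X) :
    ∀ st, ((L.foldl f st).1 = 1 ↔ (∃ x ∈ L, D x) ∨ st.1 = 1) := by
  induction L with
  | nil => intro st; simp
  | cons x L ih =>
      intro st
      rw [List.foldl_cons, ih, h]
      simp only [List.mem_cons]
      constructor
      · rintro (⟨y, hy, hD⟩ | hD | h1)
        · exact Or.inl ⟨y, Or.inr hy, hD⟩
        · exact Or.inl ⟨x, Or.inl rfl, hD⟩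
        · exact Or.inr h1
      · rintro (⟨y, rfl | hy, hD⟩ | h1)
        · exact Or.inr (Or.inl hD)
        · exact Or.inl ⟨y, hy, hD⟩
        · exact Or.inr (Or.inr h1)

lemma peung_chain_char (board : List (List Int)) :
    peung_chain board = true ↔
      ∃ i ∈ PySem.List.pyRange 0 5 1, ∃ j ∈ PySem.List.pyRange 0 5 1, Cij board i j := by
  unfold peung_chain
  have hstep : ∀ (st : Int × List (Int × Int)) (i : Int),
      ((List.foldl (fun st j =>
          if aGet board i j ≠ 0 then
            let st :=
              if j < 3 ∧ aGet board i j = aGet board i (j + 1) ∧ aGet board i (j + 1) = aGet board i (j + 2) then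
                (1, aRowRun board i j (5 - j).toNat j st.2)
              else st
            if i < 3 ∧ aGet board i j = aGet board (i + 1) j ∧ aGet board (i + 1) j = aGet board (i + 2) j then
              (1, aColRun board i j (5 - i).toNat i st.2)
            else st
          else st) st (PySem.List.pyRange 0 5 1)).1 = 1 ↔
        (∃ j ∈ PySem.List.pyRange 0 5 1, Cij board i j) ∨ st.1 = 1) := by
    intro st i
    refine foldl_flag_iff _ (fun j => Cij board i j) ?_ _ st
    intro st j
    dsimp only
    by_cases h0 : aGet board i j ≠ 0
    · rw [if_pos h0]
      by_cases hr : j < 3 ∧ aGet board i j = aGet board i (j + 1) ∧ aGet board i (j + 1) = aGet board i (j + 2)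
      · rw [if_pos hr]
        by_cases hc : i < 3 ∧ aGet board i j = aGet board (i + 1) j ∧ aGet board (i + 1) j = aGet board (i + 2) j
        · rw [if_pos hc]; exact ⟨fun _ => Or.inl ⟨h0, Or.inl hr⟩, fun _ => rfl⟩
        · rw [if_neg hc]; exact ⟨fun _ => Or.inl ⟨h0, Or.inl hr⟩, fun _ => rfl⟩
      · rw [if_neg hr]
        by_cases hc : i < 3 ∧ aGet board i j = aGet board (i + 1) j ∧ aGet board (i + 1) j = aGet board (i + 2) j
        · rw [if_pos hc]; exact ⟨fun _ => Or.inl ⟨h0, Or.inr hc⟩, fun _ => rfl⟩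
        · rw [if_neg hc]
          constructor
          · exact fun h1 => Or.inr h1
          · rintro (⟨_, hrc | hrc⟩ | h1)
            · exact absurd hrc hr
            · exact absurd hrc hc
            · exact h1
    · rw [if_neg h0]
      constructor
      · exact fun h1 => Or.inr h1
      · rintro (⟨hz, _⟩ | h1)
        · exact absurd hz h0
        · exact h1
  rw [show ∀ x : Int, ((if x = 1 then true else false) = true ↔ x = 1) from fun x => by split_ifs with h <;> simp [h]]
  rw [foldl_flag_iff _ (fun i => ∃ j ∈ PySem.List.pyRange 0 5 1, Cij board i j) hstep]
  simp

-- ----- B side: nonemptiness of the clear-set -----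

lemma add_ne_nil {A : Type} [BEq A] [LawfulBEq A] (s : PySem.Set A) (x : A) :
    PySem.Set.add s x ≠ [] := by
  rw [PySem.Set.add_eq_ite]
  split_ifs with h
  · rintro rfl; simp at h
  · simp

lemma foldl_add_nil_iff {A B : Type} [BEq A] [LawfulBEq A] (f : B → A) (l : List B) (s : PySem.Set A) :
    l.foldl (fun s b => PySem.Set.add s (f b)) s = [] ↔ s = [] ∧ l = [] := by
  induction l generalizing s with
  | nil => simp
  | cons b l ih => simp [List.foldl_cons, ih, add_ne_nil]

lemma foldl_nil_iff {A X : Type} (g : List A → X → List A) (Q : X → Prop)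
    (h : ∀ s x, (g s x = [] ↔ s = [] ∧ Q x)) (L : List X) :
    ∀ s, (L.foldl g s = [] ↔ s = [] ∧ ∀ x ∈ L, Q x) := by
  induction L with
  | nil => intro s; simp
  | cons x L ih =>
      intro s
      rw [List.foldl_cons, ih, h]
      simp only [List.mem_cons]
      constructor
      · rintro ⟨⟨hs, hq⟩, hall⟩
        exact ⟨hs, fun y hy => hy.elim (fun e => e ▸ hq) (hall y)⟩
      · rintro ⟨hs, hall⟩
        exact ⟨⟨hs, hall x (Or.inl rfl)⟩, fun y hy => hall y (Or.inr hy)⟩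

lemma peung_chain_alt_char (board : List (List Int)) :
    peung_chain_alt board = true ↔
      ¬ ((∀ i ∈ PySem.List.pyRange 0 5 1,
            runCells (PySem.List.slice (PySem.List.pyGetD board i []) none (some 5)) = []) ∧
         (∀ j ∈ PySem.List.pyRange 0 5 1,
            runCells ((PySem.List.pyRange 0 5 1).map (fun r => bGet (PySem.List.pyGetD board r []) j)) = [])) := by
  unfold peung_chain_alt
  have h1 := foldl_nil_iff
    (fun s i => (runCells (PySem.List.slice (PySem.List.pyGetD board i []) none (some 5))).foldl
        (fun s c => PySem.Set.add s (i, c)) s)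
    (fun i => runCells (PySem.List.slice (PySem.List.pyGetD board i []) none (some 5)) = [])
    (fun s i => foldl_add_nil_iff _ _ _) (PySem.List.pyRange 0 5 1)
  have h2 := foldl_nil_iff
    (fun s j => (runCells ((PySem.List.pyRange 0 5 1).map (fun r => bGet (PySem.List.pyGetD board r []) j))).foldl
        (fun s r => PySem.Set.add s (r, j)) s)
    (fun j => runCells ((PySem.List.pyRange 0 5 1).map (fun r => bGet (PySem.List.pyGetD board r []) j)) = [])
    (fun s j => foldl_add_nil_iff _ _ _) (PySem.List.pyRange 0 5 1)
  simp only [Bool.not_eq_true', List.isEmpty_eq_false_iff]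
  rw [ne_eq, h2, h1]
  simp only [PySem.Set.empty]
  tauto

-- pyRange facts used to evaluate runs on literal lines
lemma r03 : PySem.List.pyRange 0 (3:Int) 1 ≠ [] := by decide
lemma r04 : PySem.List.pyRange 0 (4:Int) 1 ≠ [] := by decide
lemma r05 : PySem.List.pyRange 0 (5:Int) 1 ≠ [] := by decide
lemma r14 : PySem.List.pyRange 1 (4:Int) 1 ≠ [] := by decide
lemma r15 : PySem.List.pyRange 1 (5:Int) 1 ≠ [] := by decide
lemma r25 : PySem.List.pyRange 2 (5:Int) 1 ≠ [] := by decide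

-- a maximal run of length >= 3 exists in a 5-line iff an adjacent nonzero triple exists
set_option maxHeartbeats 2000000 in
lemma runCells_nil_iff (a b c d e : Int) :
    runCells [a, b, c, d, e] = [] ↔
      ¬ ((a ≠ 0 ∧ a = b ∧ b = c) ∨ (b ≠ 0 ∧ b = c ∧ c = d) ∨ (c ≠ 0 ∧ c = d ∧ d = e)) := by
  have h : PySem.List.pyRange 1 (6:Int) 1 = [1,2,3,4,5] := by decide
  simp only [runCells, List.length_cons, List.length_nil, bGet]
  rcases eq_or_ne b a with hab | hab <;> rcases eq_or_ne c b with hbc | hbc <;>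
    rcases eq_or_ne d c with hcd | hcd <;> rcases eq_or_ne e d with hde | hde <;> subst_vars <;>
    simp_all [List.foldl_cons, List.foldl_nil, PySem.List.pyGetD_ofNat',
      r03, r04, r05, r14, r15, r25] <;>
    omega

lemma len5 {A : Type} (l : List A) (h : 5 ≤ l.length) :
    ∃ a b c d e t, l = a :: b :: c :: d :: e :: t := by
  rcases l with _ | ⟨a, _ | ⟨b, _ | ⟨c, _ | ⟨d, _ | ⟨e, t⟩⟩⟩⟩⟩ <;> simp at h <;>
    first
      | exact ⟨a, b, c, d, e, t, rfl⟩
      | omega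

-- the two halves of A's trigger
def RowT (board : List (List Int)) (i j : Int) : Prop :=
  j < 3 ∧ aGet board i j ≠ 0 ∧ aGet board i j = aGet board i (j + 1) ∧ aGet board i (j + 1) = aGet board i (j + 2)

def ColT (board : List (List Int)) (i j : Int) : Prop :=
  i < 3 ∧ aGet board i j ≠ 0 ∧ aGet board i j = aGet board (i + 1) j ∧ aGet board (i + 1) j = aGet board (i + 2) j

lemma cij_split (board : List (List Int)) (i j : Int) :
    Cij board i j ↔ RowT board i j ∨ ColT board i j := by
  unfold Cij RowT ColT; tauto

set_option maxHeartbeats 1600000 in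
lemma row_iff (board : List (List Int)) (hlen : 5 ≤ board.length)
    (hrows : ∀ row ∈ board.take 5, 5 ≤ row.length) (i : Int) (hi : 0 ≤ i ∧ i < 5) :
    (runCells (PySem.List.slice (PySem.List.pyGetD board i []) none (some 5)) = [] ↔
      ¬ ∃ j ∈ PySem.List.pyRange 0 5 1, RowT board i j) := by
  have hib : i < (board.length : Int) := by omega
  have hidx : i.toNat < board.length := by omega
  have hget : PySem.List.pyGetD board i [] = board[i.toNat]'hidx :=
    PySem.List.pyGetD_eq_getElem board [] hi.1 hib
  have hmem : board[i.toNat]'hidx ∈ board.take 5 := by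
    have h5 : i.toNat < (board.take 5).length := by simp; omega
    have := List.getElem_take (xs := board) (i := i.toNat) (h := h5)
    exact this ▸ List.getElem_mem h5
  obtain ⟨a, b, c, d, e, t, hl⟩ := len5 _ (hrows _ hmem)
  have haGet : ∀ j : Int, aGet board i j = PySem.List.pyGetD (a :: b :: c :: d :: e :: t) j 0 := by
    intro j; rw [aGet, hget, hl]
  have hR : PySem.List.pyRange 0 5 1 = [0, 1, 2, 3, 4] := by decide
  rw [hget, hl, show PySem.List.slice (a :: b :: c :: d :: e :: t) none (some 5) = [a, b, c, d, e] from by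
    have hs := PySem.List.slice_to_natCast (a :: b :: c :: d :: e :: t) 5
    norm_num at hs
    rw [hs]]
  rw [runCells_nil_iff]
  simp only [RowT, haGet, hR, List.mem_cons, List.not_mem_nil, or_false]
  constructor
  · intro hno ⟨j, hj, hcond⟩
    apply hno
    rcases hj with rfl | rfl | rfl | rfl | rfl <;>
      norm_num [PySem.List.pyGetD_ofNat'] at hcond <;> tauto
  · intro hno htrip
    apply hno
    rcases htrip with h | h | h
    · exact ⟨0, by norm_num, by norm_num [PySem.List.pyGetD_ofNat']; tauto⟩
    · exact ⟨1, by norm_num, by norm_num [PySem.List.pyGetD_ofNat']; tauto⟩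
    · exact ⟨2, by norm_num, by norm_num [PySem.List.pyGetD_ofNat']; tauto⟩

set_option maxHeartbeats 1600000 in
lemma col_iff (board : List (List Int)) (j : Int) :
    (runCells ((PySem.List.pyRange 0 5 1).map (fun r => bGet (PySem.List.pyGetD board r []) j)) = [] ↔
      ¬ ∃ i ∈ PySem.List.pyRange 0 5 1, ColT board i j) := by
  have hR : PySem.List.pyRange 0 5 1 = [0, 1, 2, 3, 4] := by decide
  rw [hR]
  have hmap : List.map (fun r => bGet (PySem.List.pyGetD board r []) j) [0, 1, 2, 3, 4] =
      [aGet board 0 j, aGet board 1 j, aGet board 2 j, aGet board 3 j, aGet board 4 j] := rfl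
  rw [hmap, runCells_nil_iff]
  simp only [ColT, List.mem_cons, List.not_mem_nil, or_false]
  constructor
  · intro hno ⟨i, himem, hcond⟩
    apply hno
    rcases himem with rfl | rfl | rfl | rfl | rfl <;> norm_num at hcond <;> tauto
  · intro hno htrip
    apply hno
    rcases htrip with h | h | h
    · exact ⟨0, by norm_num, by norm_num; tauto⟩
    · exact ⟨1, by norm_num, by norm_num; tauto⟩
    · exact ⟨2, by norm_num, by norm_num; tauto⟩

-- ===== VERDICT (by name: the statement is the Claim_ definition above) =====
theorem peung_chain_spec : Claim_equal_peung_chain := by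
  intro board _ hpre
  unfold Spec_peung_chain
  obtain ⟨hlen, hrows⟩ := hpre
  have hlen' : 5 ≤ board.length := hlen
  rw [show ∀ x y : Bool, x = y ↔ ((x = true) ↔ (y = true)) from by decide]
  rw [peung_chain_char, peung_chain_alt_char]
  have hmem5 : ∀ i : Int, i ∈ PySem.List.pyRange 0 5 1 → 0 ≤ i ∧ i < 5 := by
    intro i hi; exact (PySem.List.mem_pyRange_one).mp hi
  constructor
  · rintro ⟨i, hi, j, hj, hC⟩ ⟨hA, hB⟩
    rcases (cij_split board i j).mp hC with hRt | hCt
    · exact ((row_iff board hlen' hrows i (hmem5 i hi)).mp (hA i hi)) ⟨j, hj, hRt⟩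
    · exact ((col_iff board j).mp (hB j hj)) ⟨i, hi, hCt⟩
  · intro hnab
    by_contra hno
    apply hnab
    constructor
    · intro i hi
      refine (row_iff board hlen' hrows i (hmem5 i hi)).mpr ?_
      rintro ⟨j, hj, hRt⟩
      exact hno ⟨i, hi, j, hj, (cij_split board i j).mpr (Or.inl hRt)⟩
    · intro j hj
      refine (col_iff board j).mpr ?_
      rintro ⟨i, hi, hCt⟩
      exact hno ⟨i, hi, j, hj, (cij_split board i j).mpr (Or.inr hCt)⟩
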